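-- pv_equiv track=rewrite | github.com/chengyuehuang511/HMC | hmcn-f.py | check_L12_table
-- ===== SOURCE A (Python) =====
-- def check_L12_table(L12_table, L1_labels_num, L2_labels_num):
--     """check the Legality of L12_table"""
--     if len(L12_table) != L1_labels_num:
--         return False
--     L2_labels = [num for lst in L12_table for num in lst]
--     L2_labels.sort()
--     L2_labels_true = [i for i in range(L2_labels_num)]
--     if L2_labels != L2_labels_true:
--         return False
--     return True
-- ===== SOURCE B (Python) =====
-- def check_L12_table(L12_table, L1_labels_num, L2_labels_num):
--     """check the Legality of L12_table"""
--     if len(L12_table) != L1_labels_num: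
--         return False
--     n = max(L2_labels_num, 0)
--     seen = set()
--     for lst in L12_table:
--         for v in lst:
--             if v < 0 or v >= n or v in seen:
--                 return False
--             seen.add(v)
--     return len(seen) == n
-- ===== Notes on version B (the rewrite author's own statement) =====
-- stated objective: alternative
-- what changed: Replaces A's flatten-then-sort-and-compare-to-range(n) with a single pass that checks each value is in [0,n) and unseen via a set, then compares the set size to n.
import Mathlib
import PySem

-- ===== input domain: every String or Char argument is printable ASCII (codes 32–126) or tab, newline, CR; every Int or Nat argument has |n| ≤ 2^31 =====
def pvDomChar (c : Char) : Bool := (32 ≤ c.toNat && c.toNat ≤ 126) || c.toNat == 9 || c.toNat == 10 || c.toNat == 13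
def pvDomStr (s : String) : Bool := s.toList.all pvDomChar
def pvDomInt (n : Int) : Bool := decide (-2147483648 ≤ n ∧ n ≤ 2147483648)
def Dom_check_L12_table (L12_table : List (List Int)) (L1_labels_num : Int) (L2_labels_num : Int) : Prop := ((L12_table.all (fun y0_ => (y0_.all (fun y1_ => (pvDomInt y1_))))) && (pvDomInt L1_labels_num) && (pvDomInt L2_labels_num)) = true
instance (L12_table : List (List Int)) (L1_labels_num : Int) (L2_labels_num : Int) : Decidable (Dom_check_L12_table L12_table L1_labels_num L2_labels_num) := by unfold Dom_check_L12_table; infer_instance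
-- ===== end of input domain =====

-- B replaces A's flatten-sort-and-compare-to-range(n) with a single pass over the rows
-- using a seen-set (each value must be fresh and in [0, n)), then a final size check.

-- ===== PORT A =====
def check_L12_table (L12_table : List (List Int)) (L1_labels_num : Int) (L2_labels_num : Int) : Bool :=
  if (L12_table.length : Int) ≠ L1_labels_num then false
  else
    let L2_labels := L12_table.flatMap (fun lst => lst)
    let L2_labels := PySem.List.sorted L2_labels (fun x => x) false
    let L2_labels_true := (PySem.List.pyRange 0 L2_labels_num 1).map (fun i => i)
    if L2_labels ≠ L2_labels_true then false else true

-- ===== PORT B =====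
-- inner 'for v in lst' loop: none = early 'return False'
def pvAltInner (n : Int) (seen : PySem.Set Int) (lst : List Int) : Option (PySem.Set Int) :=
  match lst with
  | [] => some seen
  | v :: rest =>
    if v < 0 ∨ n ≤ v ∨ v ∈ seen then none
    else pvAltInner n (PySem.Set.add seen v) rest

-- outer 'for lst in L12_table' loop
def pvAltOuter (n : Int) (seen : PySem.Set Int) (rows : List (List Int)) : Option (PySem.Set Int) :=
  match rows with
  | [] => some seen
  | r :: rest =>
    match pvAltInner n seen r with
    | none => none
    | some s => pvAltOuter n s rest

def check_L12_table_alt (L12_table : List (List Int)) (L1_labels_num : Int) (L2_labels_num : Int) : Bool :=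
  if (L12_table.length : Int) ≠ L1_labels_num then false
  else
    let n := max L2_labels_num 0
    match pvAltOuter n PySem.Set.empty L12_table with
    | none => false
    | some seen => decide ((PySem.Set.len seen : Int) = n)

-- ===== PRECONDITION & SPEC =====
def Spec_check_L12_table (L12_table : List (List Int)) (L1_labels_num : Int) (L2_labels_num : Int) (out : Bool) : Prop := out = check_L12_table_alt L12_table L1_labels_num L2_labels_num
instance (L12_table : List (List Int)) (L1_labels_num : Int) (L2_labels_num : Int) (out : Bool) : Decidable (Spec_check_L12_table L12_table L1_labels_num L2_labels_num out) := by unfold Spec_check_L12_table; infer_instance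

-- ===== CLAIM (what is proved, stated in full; the proofs are below) =====
def Claim_equal_check_L12_table : Prop := ∀ (L12_table : List (List Int)) (L1_labels_num : Int) (L2_labels_num : Int), Dom_check_L12_table L12_table L1_labels_num L2_labels_num → Spec_check_L12_table L12_table L1_labels_num L2_labels_num (check_L12_table L12_table L1_labels_num L2_labels_num)

-- ===== LEMMAS AND PROOFS =====

-- the inner loop succeeds exactly when the new values are fresh, distinct and in [0, n)
theorem pvAltInner_some (n : Int) (lst : List Int) : ∀ (seen : PySem.Set Int), seen.Nodup →
    ∀ s, pvAltInner n seen lst = some s ↔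
      (s = seen ++ lst ∧ (seen ++ lst).Nodup ∧ ∀ v ∈ lst, 0 ≤ v ∧ v < n) := by
  induction lst with
  | nil =>
    intro seen hnd s
    simp [pvAltInner]
    exact ⟨fun h => ⟨h.symm, hnd⟩, fun h => h.1.symm⟩
  | cons v rest ih =>
    intro seen hnd s
    by_cases hg : v < 0 ∨ n ≤ v ∨ v ∈ seen
    · simp only [pvAltInner, if_pos hg]
      constructor
      · intro h; cases h
      · rintro ⟨-, hnd2, hb⟩
        rcases hg with h | h | h
        · exact absurd (hb v (by simp)).1 (by omega)
        · exact absurd (hb v (by simp)).2 (by omega)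
        · rw [List.nodup_append] at hnd2
          exact (hnd2.2.2 v h v List.mem_cons_self rfl).elim
    · have hg' := hg
      simp only [not_or, not_lt, not_le] at hg'
      obtain ⟨h0, hn, hmem⟩ := hg'
      have hadd : PySem.Set.add seen v = seen ++ [v] := by
        simp [PySem.Set.add, List.contains_eq_mem, hmem]
      have hnd' : (seen ++ [v]).Nodup := by
        rw [List.nodup_append]
        exact ⟨hnd, List.nodup_singleton v,
          by intro a ha b hb; simp at hb; subst hb; intro h; subst h; exact hmem ha⟩
      simp only [pvAltInner, if_neg hg, hadd]
      rw [ih (seen ++ [v]) hnd' s]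
      constructor
      · rintro ⟨hs, hnd2, hb⟩
        refine ⟨by simpa using hs, by simpa using hnd2, ?_⟩
        intro w hw; rcases List.mem_cons.mp hw with h | h
        · subst h; exact ⟨by omega, by omega⟩
        · exact hb w h
      · rintro ⟨hs, hnd2, hb⟩
        refine ⟨by simpa using hs, by simpa using hnd2, ?_⟩
        intro w hw; exact hb w (List.mem_cons_of_mem _ hw)

-- the outer loop is the inner loop over the concatenation of the rows
theorem pvAltOuter_eq_inner_flat (n : Int) (rows : List (List Int)) : ∀ (seen : PySem.Set Int),
    pvAltOuter n seen rows = pvAltInner n seen (rows.flatMap (fun lst => lst)) := by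
  induction rows with
  | nil => intro seen; simp [pvAltOuter, List.flatMap, pvAltInner]
  | cons r rest ih =>
    intro seen
    have happ : ∀ (xs ys : List Int) (s : PySem.Set Int),
        pvAltInner n s (xs ++ ys) =
          match pvAltInner n s xs with
          | none => none
          | some t => pvAltInner n t ys := by
      intro xs; induction xs with
      | nil => intro ys s; simp [pvAltInner]
      | cons x xt ihx =>
        intro ys s
        by_cases hg : x < 0 ∨ n ≤ x ∨ x ∈ s
        · simp [pvAltInner, if_pos hg]
        · simp only [List.cons_append, pvAltInner, if_neg hg]
          exact ihx ys _
    rw [pvAltOuter]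
    cases h : pvAltInner n seen r with
    | none => simp [List.flatMap_cons, happ, h]
    | some s => simp [List.flatMap_cons, happ, h, ih]

-- the crux: flattened-and-sorted equals range(n) iff the values are distinct,
-- all in [0, n) with n := max L2 0, and there are exactly n of them
theorem sorted_eq_range_iff (flat : List Int) (l2 : Int) :
    (PySem.List.sorted flat (fun x => x) false = (PySem.List.pyRange 0 l2 1).map (fun i => i)) ↔
      (flat.Nodup ∧ (∀ v ∈ flat, 0 ≤ v ∧ v < max l2 0) ∧ (flat.length : Int) = max l2 0) := by
  have hm : (0 : Int) ≤ max l2 0 := le_max_right _ _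
  have hrange : (PySem.List.pyRange 0 l2 1).map (fun i => i) = PySem.List.pyRange 0 (max l2 0) 1 := by
    rcases le_or_gt l2 0 with h | h
    · rw [PySem.List.pyRange_one_eq_nil h, PySem.List.pyRange_one_eq_nil (by omega)]; rfl
    · rw [max_eq_left (by omega)]; simp
  rw [hrange]
  constructor
  · intro h
    have hp : (PySem.List.pyRange 0 (max l2 0) 1).Perm flat := h ▸ PySem.List.sorted_perm flat _ _
    refine ⟨hp.nodup (PySem.List.nodup_pyRange_one _ _), ?_, ?_⟩
    · intro v hv
      have := hp.mem_iff.mpr hv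
      rw [PySem.List.mem_pyRange_one] at this; exact this
    · have := hp.length_eq
      rw [PySem.List.length_pyRange_one] at this
      omega
  · rintro ⟨hnd, hb, hlen⟩
    have hsub : flat ⊆ PySem.List.pyRange 0 (max l2 0) 1 := by
      intro v hv; rw [PySem.List.mem_pyRange_one]; exact (hb v hv)
    have hsp : List.Subperm flat (PySem.List.pyRange 0 (max l2 0) 1) := List.subperm_of_subset hnd hsub
    have hp : flat.Perm (PySem.List.pyRange 0 (max l2 0) 1) := by
      apply hsp.perm_of_length_le
      rw [PySem.List.length_pyRange_one]; omega
    exact PySem.List.sorted_eq_of_perm_of_pairwise_lt _ _ _ hp.symm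
      (PySem.List.pairwise_lt_pyRange_one _ _)

-- ===== VERDICT (by name: the statement is the Claim_ definition above) =====
theorem check_L12_table_spec : Claim_equal_check_L12_table := by
  intro t l1 l2 _
  unfold Spec_check_L12_table check_L12_table check_L12_table_alt
  by_cases hlen : (t.length : Int) ≠ l1
  · simp [hlen]
  · simp only [if_neg hlen]
    rw [pvAltOuter_eq_inner_flat]
    set flat := t.flatMap (fun lst => lst) with hflat
    by_cases hP : flat.Nodup ∧ (∀ v ∈ flat, 0 ≤ v ∧ v < max l2 0) ∧ (flat.length : Int) = max l2 0
    · have hsort := (sorted_eq_range_iff flat l2).mpr hP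
      have hinner : pvAltInner (max l2 0) PySem.Set.empty flat = some flat :=
        (pvAltInner_some _ flat _ (by simp [PySem.Set.empty]) flat).mpr
          ⟨by simp [PySem.Set.empty], by simpa [PySem.Set.empty] using hP.1, hP.2.1⟩
      simp only [PySem.Set.empty] at hinner
      rw [if_neg (by simp [hsort])]
      simp [hinner, PySem.Set.len, hP.2.2]
    · have hsort : PySem.List.sorted flat (fun x => x) false ≠ (PySem.List.pyRange 0 l2 1).map (fun i => i) :=
        fun h => hP ((sorted_eq_range_iff flat l2).mp h)
      rw [if_pos hsort]
      cases h : pvAltInner (max l2 0) ([] : PySem.Set Int) flat with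
      | none => simp [h]
      | some s =>
        obtain ⟨hs, hnd, hb⟩ := (pvAltInner_some _ flat ([] : PySem.Set Int) (by simp) s).mp h
        simp only [List.nil_append] at hs hnd
        subst hs
        have hne : (flat.length : Int) ≠ max l2 0 := fun hl => hP ⟨hnd, hb, hl⟩
        simp [h, PySem.Set.len, hne]
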